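-- pv_equiv track=rewrite | github.com/updaun/level2-cv-09 | src/lyh/coding_test/ahnlab/bj_1292.py | solution
-- ===== SOURCE A (Python) =====
-- def solution(A, B):
--     idx, result = 0, 0
--     for num in range(1, 51):
--         for i in range(num):
--             idx += 1
--             if idx >= A:
--                 result += num
--             if idx == B:
--                 return result
--     return 0
-- ===== SOURCE B (Python) =====
-- # Build the fixed 1,2,2,3,3,3,... table once, then answer each query with one slice sum.
-- SEQ = [n for n in range(1, 51) for _ in range(n)]
--
-- def solution(A, B):
--     if B < 1 or B > len(SEQ):
--         return 0
--     lo = A - 1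
--     if lo < 0:
--         lo = 0
--     return sum(SEQ[lo:B])
-- ===== Notes on version B (the rewrite author's own statement) =====
-- stated objective: simpler
-- what changed: Replaces the intertwined nested accumulate-and-early-return loops with a precomputed 1275-element table and a single guarded slice sum per query.
import Mathlib
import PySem

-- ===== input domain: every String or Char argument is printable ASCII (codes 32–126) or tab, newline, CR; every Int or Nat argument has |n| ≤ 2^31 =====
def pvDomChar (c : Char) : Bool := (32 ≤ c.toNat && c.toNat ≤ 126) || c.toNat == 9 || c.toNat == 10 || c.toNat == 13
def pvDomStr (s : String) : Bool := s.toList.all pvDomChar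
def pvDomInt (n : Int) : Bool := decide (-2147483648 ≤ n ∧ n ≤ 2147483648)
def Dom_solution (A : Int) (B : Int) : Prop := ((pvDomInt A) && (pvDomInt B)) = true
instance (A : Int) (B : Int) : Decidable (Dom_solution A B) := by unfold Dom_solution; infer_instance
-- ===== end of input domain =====

-- B precomputes the fixed 1,2,2,3,3,3,… table once and answers by one guarded slice sum (simpler decomposition).

-- ===== PORT A =====
-- inner 'for i in range(num)' loop; .inr = early 'return result', .inl = fall through with state (idx, result)
def solInner (A B num : Int) : List Int → Int × Int → (Int × Int) ⊕ Int
  | [], s => .inl s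
  | _ :: rest, (idx, result) =>
    let idx := idx + 1
    let result := if idx ≥ A then result + num else result
    if idx = B then .inr result else solInner A B num rest (idx, result)

-- outer 'for num in range(1, 51)' loop; falls off the end with 'return 0'
def solOuter (A B : Int) : List Int → Int × Int → Int
  | [], _ => 0
  | num :: rest, s =>
    match solInner A B num (PySem.List.pyRange 0 num 1) s with
    | .inl s' => solOuter A B rest s'
    | .inr r => r

def solution (A : Int) (B : Int) : Int :=
  solOuter A B (PySem.List.pyRange 1 51 1) (0, 0)

-- ===== PORT B =====
-- SEQ = [n for n in range(1, 51) for _ in range(n)]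
def seqB : List Int :=
  (PySem.List.pyRange 1 51 1).flatMap (fun n => (PySem.List.pyRange 0 n 1).map (fun _ => n))

def solution_alt (A : Int) (B : Int) : Int :=
  if B < 1 ∨ B > (seqB.length : Int) then 0
  else
    let lo : Int := if A - 1 < 0 then 0 else A - 1
    (PySem.List.slice seqB (some lo) (some B)).sum

-- ===== PRECONDITION & SPEC =====
def Spec_solution (A : Int) (B : Int) (out : Int) : Prop := out = solution_alt A B
instance (A : Int) (B : Int) (out : Int) : Decidable (Spec_solution A B out) := by unfold Spec_solution; infer_instance

-- ===== CLAIM (what is proved, stated in full; the proofs are below) =====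
def Claim_equal_solution : Prop := ∀ (A : Int) (B : Int), Dom_solution A B → Spec_solution A B (solution A B)

-- ===== LEMMAS AND PROOFS =====

-- flattened single loop over the value sequence; some = early return, none = fell through
def run (A B : Int) : List Int → Int → Int → Option Int
  | [], _, _ => none
  | v :: vs, idx, r =>
    let idx' := idx + 1
    let r' := if idx' ≥ A then r + v else r
    if idx' = B then some r' else run A B vs idx' r'

-- state transformer of one loop step when no return fires
def stepF (A : Int) (s : Int × Int) (v : Int) : Int × Int :=
  (s.1 + 1, if s.1 + 1 ≥ A then s.2 + v else s.2)

lemma inner_char (A B num : Int) : ∀ (l : List Int) (idx r : Int),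
    solInner A B num l (idx, r) =
      match run A B (List.replicate l.length num) idx r with
      | some v => Sum.inr v
      | none => Sum.inl (List.foldl (stepF A) (idx, r) (List.replicate l.length num)) := by
  intro l
  induction l with
  | nil => intro idx r; simp [solInner, run]
  | cons x xs ih =>
    intro idx r
    simp only [solInner, List.length_cons, List.replicate_succ, run, List.foldl_cons]
    by_cases h : idx + 1 = B
    · simp [h]
    · simp only [h, if_false]
      rw [ih]
      rfl

lemma run_append (A B : Int) : ∀ (xs ys : List Int) (idx r : Int),
    run A B (xs ++ ys) idx r =
      match run A B xs idx r with
      | some v => some v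
      | none =>
          run A B ys (List.foldl (stepF A) (idx, r) xs).1 (List.foldl (stepF A) (idx, r) xs).2 := by
  intro xs
  induction xs with
  | nil => intro ys idx r; simp [run]
  | cons x xs ih =>
    intro ys idx r
    simp only [List.cons_append, run, List.foldl_cons]
    by_cases h : idx + 1 = B
    · simp [h]
    · simp only [h, if_false]
      rw [ih]
      rfl

lemma outer_char (A B : Int) : ∀ (nums : List Int) (idx r : Int),
    solOuter A B nums (idx, r) =
      (run A B (nums.flatMap (fun n => List.replicate n.toNat n)) idx r).getD 0 := by
  intro nums
  induction nums with
  | nil => intro idx r; simp [solOuter, run]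
  | cons n ns ih =>
    intro idx r
    simp only [solOuter, List.flatMap_cons]
    rw [run_append]
    have hlen : (PySem.List.pyRange 0 n 1).length = n.toNat := by
      rw [PySem.List.length_pyRange_one]; omega
    rw [inner_char, hlen]
    cases hrun : run A B (List.replicate n.toNat n) idx r with
    | some v => simp
    | none =>
      simp only
      rw [ih]

-- the flattened loop computes a slice sum
lemma run_char (A B : Int) : ∀ (vs : List Int) (idx r : Int),
    run A B vs idx r =
      if idx < B ∧ B ≤ idx + (vs.length : Int)
      then some (r + ((vs.take (B - idx).toNat).drop (A - 1 - idx).toNat).sum)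
      else none := by
  intro vs
  induction vs with
  | nil =>
    intro idx r
    simp only [run, List.length_nil]
    split_ifs with h
    · omega
    · rfl
  | cons v vs ih =>
    intro idx r
    simp only [run, List.length_cons]
    push_cast
    by_cases hB : idx + 1 = B
    · rw [if_pos hB, if_pos (show idx < B ∧ B ≤ idx + ((vs.length : Int) + 1) by omega)]
      have h1 : (B - idx).toNat = 1 := by omega
      rw [h1, List.take_succ_cons, List.take_zero]
      by_cases hA : idx + 1 ≥ A
      · have h0 : (A - 1 - idx).toNat = 0 := by omega
        simp [hA, h0]
      · have h0 : 1 ≤ (A - 1 - idx).toNat := by omega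
        rw [List.drop_eq_nil_of_le (by simpa using h0)]
        simp [hA]
    · rw [if_neg hB, ih]
      by_cases hcond : idx + 1 < B ∧ B ≤ idx + 1 + (vs.length : Int)
      · rw [if_pos hcond,
          if_pos (show idx < B ∧ B ≤ idx + ((vs.length : Int) + 1) by omega)]
        have htake : (B - idx).toNat = (B - (idx + 1)).toNat + 1 := by omega
        rw [htake, List.take_succ_cons]
        by_cases hA : idx + 1 ≥ A
        · have h0 : (A - 1 - idx).toNat = 0 := by omega
          have h0' : (A - 1 - (idx + 1)).toNat = 0 := by omega
          simp [hA, h0, h0', add_assoc]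
        · have hd : (A - 1 - idx).toNat = (A - 1 - (idx + 1)).toNat + 1 := by omega
          simp [hA, hd]
      · rw [if_neg hcond,
          if_neg (show ¬(idx < B ∧ B ≤ idx + ((vs.length : Int) + 1)) by omega)]

lemma seqB_eq : seqB = (PySem.List.pyRange 1 51 1).flatMap (fun n => List.replicate n.toNat n) := by
  unfold seqB
  congr 1
  funext n
  rw [List.map_const']
  congr 1
  rw [PySem.List.length_pyRange_one]
  omega

set_option maxRecDepth 100000 in
lemma seqB_len : seqB.length = 1275 := by decide

-- ===== VERDICT (by name: the statement is the Claim_ definition above) =====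
theorem solution_spec : Claim_equal_solution := by
  intro A B _
  unfold Spec_solution solution solution_alt
  rw [outer_char, ← seqB_eq, run_char, seqB_len]
  by_cases h : (0 : Int) < B ∧ B ≤ 0 + ((1275 : Nat) : Int)
  · rw [if_pos h, if_neg (by push_cast at h ⊢; omega)]
    simp only [Option.getD_some]
    rw [PySem.List.slice_toNat]
    · have hto : (if A - 1 < 0 then (0:Int) else A - 1).toNat = (A - 1).toNat := by
        split_ifs <;> omega
      rw [hto, List.drop_take]
      norm_num
    · split_ifs <;> omega
    · omega
  · rw [if_neg h, if_pos (by push_cast at h ⊢; omega)]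
    simp
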